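-- pv_equiv track=rewrite | github.com/lemon-lime-honey/baekjoon | 프로그래머스/2/86971. 전력망을 둘로 나누기/전력망을 둘로 나누기.py | solution
-- ===== SOURCE A (Python) =====
-- def solution(n, wires):
--     tree = [[] for i in range(n + 1)]
--     answer = int(1e9)
--
--     for start, end in wires:
--         tree[start].append(end)
--         tree[end].append(start)
--
--     for start, end in wires:
--         chk = [False for i in range(n + 1)]
--         chk[1] = True
--         stack = [1]
--         cnt = 1
--
--         while stack:
--             now = stack.pop()
--             for node in tree[now]:
--                 if ((now == start and node == end) or
--                     (now == end and node == start) or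
--                     chk[node]):
--                     continue
--                 stack.append(node)
--                 chk[node] = True
--                 cnt += 1
--
--         answer = min(answer, abs(n - (2 * cnt)))
--
--     return answer
-- ===== SOURCE B (Python) =====
-- def solution(n, wires):
--     best = 10 ** 9
--     for s, e in wires:
--         comp = {v: v for v in range(n + 1)}
--         for a, b in wires:
--             if {a, b} == {s, e}:
--                 continue
--             ca, cb = comp[a], comp[b]
--             if ca != cb:
--                 comp = {v: (cb if c == ca else c) for v, c in comp.items()}
--         root = comp[1]
--         size = list(comp.values()).count(root)
--         best = min(best, abs(n - 2 * size))
--     return best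
-- ===== Notes on version B (the rewrite author's own statement) =====
-- stated objective: alternative
-- what changed: per-wire stack DFS over a prebuilt adjacency list is replaced by per-wire equivalence-class merging: a node-to-component-label dict, relabelling one class for each remaining wire, then counting nodes sharing node 1's label
-- outside the precondition, e.g. on solution(2, [(1, 2), (1, -1)]): A returns 2, B raises KeyError
import Mathlib
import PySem

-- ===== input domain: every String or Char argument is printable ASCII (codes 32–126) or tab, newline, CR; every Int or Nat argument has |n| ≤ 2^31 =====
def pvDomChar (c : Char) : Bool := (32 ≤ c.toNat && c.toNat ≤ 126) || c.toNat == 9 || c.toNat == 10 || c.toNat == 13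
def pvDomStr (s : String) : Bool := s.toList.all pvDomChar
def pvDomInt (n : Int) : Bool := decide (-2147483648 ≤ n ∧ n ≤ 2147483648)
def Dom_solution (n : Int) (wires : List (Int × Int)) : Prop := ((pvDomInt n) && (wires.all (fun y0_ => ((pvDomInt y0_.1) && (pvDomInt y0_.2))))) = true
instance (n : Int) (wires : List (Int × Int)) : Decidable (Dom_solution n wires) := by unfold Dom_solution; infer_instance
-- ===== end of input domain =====

-- B replaces A's per-wire stack DFS by per-wire equivalence-class merging on a node→label dict
-- (alternative algorithm, similar size; not claimed faster).

-- ===== PORT A =====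

-- tree[start].append(end); tree[end].append(start)  (indices are in range under Pre_, so pyGetD/pySetD are exact)
def buildTree (n : Int) (wires : List (Int × Int)) : List (List Int) :=
  wires.foldl
    (fun tree se =>
      let t1 := PySem.List.pySetD tree se.1 (PySem.List.pyGetD tree se.1 [] ++ [se.2])
      PySem.List.pySetD t1 se.2 (PySem.List.pyGetD t1 se.2 [] ++ [se.1]))
    ((PySem.List.pyRange 0 (n + 1) 1).map (fun _ => ([] : List Int)))

-- body of 'for node in tree[now]': skip if removed edge or already checked, else push/mark/count
def dfsStep (s e now : Int) (st : List Bool × List Int × Int) (node : Int) :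
    List Bool × List Int × Int :=
  if (now = s ∧ node = e) ∨ (now = e ∧ node = s) ∨ PySem.List.pyGetD st.1 node false = true then st
  else (PySem.List.pySetD st.1 node true, st.2.1 ++ [node], st.2.2 + 1)

-- 'while stack:' — fuel-guarded structural recursion (fuel only makes the loop total; under Pre_
-- the stack empties before fuel runs out, proved in dfsLoop_run below)
def dfsLoop (tree : List (List Int)) (s e : Int) :
    Nat → List Bool → List Int → Int → Int
  | 0, _, _, cnt => cnt
  | fuel + 1, chk, stack, cnt =>
    match PySem.List.pop? stack (-1) with
    | none => cnt
    | some (now, rest) =>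
      let st := (PySem.List.pyGetD tree now []).foldl (dfsStep s e now) (chk, rest, cnt)
      dfsLoop tree s e fuel st.1 st.2.1 st.2.2

def solution (n : Int) (wires : List (Int × Int)) : Int :=
  let tree := buildTree n wires
  wires.foldl
    (fun answer se =>
      let chk := PySem.List.pySetD ((PySem.List.pyRange 0 (n + 1) 1).map (fun _ => false)) 1 true
      let cnt := dfsLoop tree se.1 se.2 (n.toNat + 2) chk [1] 1
      min answer |n - 2 * cnt|)
    1000000000

-- ===== PORT B =====

-- {a, b} == {s, e}: equality of the two Python two-element sets (exact for Int literals)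
def pairEq (a b s e : Int) : Bool := (a = s ∧ b = e) ∨ (a = e ∧ b = s)

-- comp = {v: (cb if c == ca else c) for v, c in comp.items()}  (keys unchanged, in order)
def relabel (comp : PySem.Dict Int Int) (ca cb : Int) : PySem.Dict Int Int :=
  PySem.Dict.mk (comp.items.map (fun vc => (vc.1, if vc.2 = ca then cb else vc.2)))

-- body of 'for a, b in wires' (keys a, b are present under Pre_, so getD is exact)
def mergeStep (s e : Int) (comp : PySem.Dict Int Int) (ab : Int × Int) : PySem.Dict Int Int :=
  if pairEq ab.1 ab.2 s e then comp
  else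
    let ca := comp.getD ab.1 0
    let cb := comp.getD ab.2 0
    if ca ≠ cb then relabel comp ca cb else comp

def solution_alt (n : Int) (wires : List (Int × Int)) : Int :=
  wires.foldl
    (fun best se =>
      -- comp = {v: v for v in range(n + 1)}  (distinct fresh keys, insertion order)
      let comp0 : PySem.Dict Int Int :=
        PySem.Dict.mk ((PySem.List.pyRange 0 (n + 1) 1).map (fun v => (v, v)))
      let comp := wires.foldl (mergeStep se.1 se.2) comp0
      let root := comp.getD 1 0
      let size : Int := (comp.values.count root : Int)
      min best |n - 2 * size|)
    1000000000

-- ===== PRECONDITION & SPEC =====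
-- Pre_ excludes (a) nonempty wire lists with n < 1 or an endpoint outside [-(n+1), n], where A
-- raises IndexError, and (b) nonempty wire lists with a negative endpoint, where A returns a value
-- shaped by Python's negative-index wraparound (the traversal aliases label -k with node n+1-k
-- while the removed-edge test compares raw labels) — B, keyed by the actual node labels 0..n,
-- raises KeyError there instead.
def Pre_solution (n : Int) (wires : List (Int × Int)) : Prop :=
  wires = [] ∨ (1 ≤ n ∧ ∀ p ∈ wires, 0 ≤ p.1 ∧ p.1 ≤ n ∧ 0 ≤ p.2 ∧ p.2 ≤ n)
instance (n : Int) (wires : List (Int × Int)) : Decidable (Pre_solution n wires) := by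
  unfold Pre_solution; infer_instance

def pvWitness_solution : Int × (List (Int × Int)) := (4, [(1, 2), (2, 3), (3, 4)])

def Spec_solution (n : Int) (wires : List (Int × Int)) (out : Int) : Prop := out = solution_alt n wires
instance (n : Int) (wires : List (Int × Int)) (out : Int) : Decidable (Spec_solution n wires out) := by unfold Spec_solution; infer_instance

-- ===== CLAIM (what is proved, stated in full; the proofs are below) =====
def Claim_equal_solution : Prop := ∀ (n : Int) (wires : List (Int × Int)), Dom_solution n wires → Pre_solution n wires → Spec_solution n wires (solution n wires)

-- ===== LEMMAS AND PROOFS =====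

-- one traversal step allowed after removing wire (s, e): an edge of some wire whose unordered raw
-- pair differs from {s, e}
def pstep (wires : List (Int × Int)) (s e x y : Int) : Prop :=
  ∃ p ∈ wires, pairEq p.1 p.2 s e = false ∧ ((p.1 = x ∧ p.2 = y) ∨ (p.2 = x ∧ p.1 = y))

def conn (wires : List (Int × Int)) (s e x y : Int) : Prop :=
  Relation.ReflTransGen (pstep wires s e) x y

def adjIn (l : List (Int × Int)) (v u : Int) : Prop :=
  ∃ p ∈ l, (p.1 = v ∧ p.2 = u) ∨ (p.2 = v ∧ p.1 = u)

def chkTrue (chk : List Bool) (v : Int) : Prop := PySem.List.pyGetD chk v false = true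

lemma pairEq_true_iff (a b s e : Int) :
    pairEq a b s e = true ↔ ((a = s ∧ b = e) ∨ (a = e ∧ b = s)) := by
  simp [pairEq]

lemma pstep_symm (wires : List (Int × Int)) (s e : Int) : Symmetric (pstep wires s e) := by
  intro x y ⟨p, hp, hpe, hm⟩
  exact ⟨p, hp, hpe, by tauto⟩

lemma conn_symm (wires : List (Int × Int)) (s e : Int) : Symmetric (conn wires s e) :=
  Relation.ReflTransGen.symmetric (pstep_symm wires s e)

lemma pstep_iff (wires : List (Int × Int)) (s e v u : Int) :
    pstep wires s e v u ↔ adjIn wires v u ∧ ¬((v = s ∧ u = e) ∨ (v = e ∧ u = s)) := by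
  constructor
  · rintro ⟨p, hp, hpe, hm⟩
    refine ⟨⟨p, hp, hm⟩, ?_⟩
    have h1 : ¬((p.1 = s ∧ p.2 = e) ∨ (p.1 = e ∧ p.2 = s)) := by
      intro h; rw [← pairEq_true_iff p.1 p.2 s e] at h; simp [h] at hpe
    omega
  · rintro ⟨⟨p, hp, hm⟩, hb⟩
    refine ⟨p, hp, ?_, hm⟩
    have : ¬((p.1 = s ∧ p.2 = e) ∨ (p.1 = e ∧ p.2 = s)) := by omega
    rw [← pairEq_true_iff p.1 p.2 s e] at this
    simp at this; exact this

lemma conn_rng (n : Int) (wires : List (Int × Int)) (s e v : Int) (hn : 1 ≤ n)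
    (hw : ∀ p ∈ wires, 0 ≤ p.1 ∧ p.1 ≤ n ∧ 0 ≤ p.2 ∧ p.2 ≤ n)
    (h : conn wires s e 1 v) : 0 ≤ v ∧ v ≤ n := by
  induction h with
  | refl => omega
  | tail _hxy hstep _ih =>
    rcases hstep with ⟨p, hp, _, hm⟩
    have := hw p hp
    omega

lemma pyGetD_pySetD_int {α : Type} (xs : List α) (i j : Int) (v d : α)
    (h0 : 0 ≤ i) (h1 : i < xs.length) (hj : 0 ≤ j) :
    PySem.List.pyGetD (PySem.List.pySetD xs i v) j d
      = if j = i then v else PySem.List.pyGetD xs j d := by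
  rw [PySem.List.pySetD_of_nonneg xs v h0]
  by_cases hjl : j < (xs.length : Int)
  · rw [PySem.List.pyGetD_eq_getElem _ d hj (by simpa using hjl),
        PySem.List.pyGetD_eq_getElem _ d hj (by simpa using hjl)]
    rw [List.getElem_set]
    have : i.toNat = j.toNat ↔ j = i := by omega
    simp only [this]
  · have hnone : PySem.List.pyGet? (xs.set i.toNat v) j = none := by
      rw [PySem.List.pyGet?_eq_none_iff]
      simp only [PySem.Raise.InRange, List.length_set]
      omega
    have hnone2 : PySem.List.pyGet? xs j = none := by
      rw [PySem.List.pyGet?_eq_none_iff]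
      simp only [PySem.Raise.InRange]
      omega
    rw [PySem.List.pyGetD_of_none _ _ _ hnone, PySem.List.pyGetD_of_none _ _ _ hnone2]
    have : ¬ j = i := by omega
    simp [this]

lemma pyGetD_oor {α : Type} (xs : List α) (j : Int) (d : α) (hj : (xs.length : Int) ≤ j) :
    PySem.List.pyGetD xs j d = d := by
  apply PySem.List.pyGetD_of_none
  rw [PySem.List.pyGet?_eq_none_iff]
  simp only [PySem.Raise.InRange]
  omega

lemma counts_set_bool : ∀ (l : List Bool) (k : Nat), l[k]? = some false →
    (l.set k true).count true = l.count true + 1 ∧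
    (l.set k true).count false + 1 = l.count false := by
  intro l
  induction l with
  | nil => intro k h; simp at h
  | cons b t ih =>
    intro k h
    cases k with
    | zero =>
      simp at h; subst h
      simp
    | succ k =>
      simp only [List.getElem?_cons_succ] at h
      have := ih k h
      simp only [List.set_cons_succ, List.count_cons]
      omega

-- ===== A-side: the DFS loop computes the connected component of 1 =====

lemma adjIn_nil (v u : Int) : ¬ adjIn [] v u := by simp [adjIn]

lemma adjIn_cons (p : Int × Int) (t : List (Int × Int)) (v u : Int) :
    adjIn (p :: t) v u ↔ (((p.1 = v ∧ p.2 = u) ∨ (p.2 = v ∧ p.1 = u)) ∨ adjIn t v u) := by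
  constructor
  · rintro ⟨q, hq, hm⟩
    rcases List.mem_cons.1 hq with h | h
    · subst h; exact Or.inl hm
    · exact Or.inr ⟨q, h, hm⟩
  · rintro (hm | ⟨q, hq, hm⟩)
    · exact ⟨p, List.mem_cons_self, hm⟩
    · exact ⟨q, List.mem_cons.2 (Or.inr hq), hm⟩

lemma adjIn_rng (n : Int) (wires : List (Int × Int)) (v u : Int)
    (hw : ∀ p ∈ wires, 0 ≤ p.1 ∧ p.1 ≤ n ∧ 0 ≤ p.2 ∧ p.2 ≤ n)
    (h : adjIn wires v u) : 0 ≤ u ∧ u ≤ n := by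
  rcases h with ⟨p, hp, hm⟩
  have := hw p hp
  omega

lemma buildTree_go (n : Int) (hn : 1 ≤ n) :
    ∀ (l : List (Int × Int)) (acc : List (List Int)),
      acc.length = (n + 1).toNat →
      (∀ p ∈ l, 0 ≤ p.1 ∧ p.1 ≤ n ∧ 0 ≤ p.2 ∧ p.2 ≤ n) →
      (List.foldl
        (fun tree se =>
          let t1 := PySem.List.pySetD tree se.1 (PySem.List.pyGetD tree se.1 [] ++ [se.2])
          PySem.List.pySetD t1 se.2 (PySem.List.pyGetD t1 se.2 [] ++ [se.1])) acc l).length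
          = (n + 1).toNat ∧
      ∀ v u : Int, 0 ≤ v → v ≤ n →
        (u ∈ PySem.List.pyGetD (List.foldl
          (fun tree se =>
            let t1 := PySem.List.pySetD tree se.1 (PySem.List.pyGetD tree se.1 [] ++ [se.2])
            PySem.List.pySetD t1 se.2 (PySem.List.pyGetD t1 se.2 [] ++ [se.1])) acc l) v []
          ↔ (u ∈ PySem.List.pyGetD acc v [] ∨ adjIn l v u)) := by
  intro l
  induction l with
  | nil =>
    intro acc hlen _
    refine ⟨hlen, ?_⟩
    intro v u _ _
    simp [adjIn_nil]
  | cons p t ih =>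
    intro acc hlen hl
    have hp := hl p List.mem_cons_self
    have hlenInt : (acc.length : Int) = n + 1 := by rw [hlen]; omega
    set t1 := PySem.List.pySetD acc p.1 (PySem.List.pyGetD acc p.1 [] ++ [p.2]) with ht1
    set acc' := PySem.List.pySetD t1 p.2 (PySem.List.pyGetD t1 p.2 [] ++ [p.1]) with hacc'
    have hlent1 : t1.length = acc.length := PySem.List.length_pySetD _ _ _
    have hlenacc' : acc'.length = acc.length := by
      rw [hacc', PySem.List.length_pySetD, hlent1]
    have hget1 : ∀ x : Int, 0 ≤ x →
        PySem.List.pyGetD t1 x [] =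
          if x = p.1 then PySem.List.pyGetD acc p.1 [] ++ [p.2] else PySem.List.pyGetD acc x [] := by
      intro x hx
      exact pyGetD_pySetD_int acc p.1 x _ [] hp.1 (by omega) hx
    have hget2 : ∀ x : Int, 0 ≤ x →
        PySem.List.pyGetD acc' x [] =
          if x = p.2 then PySem.List.pyGetD t1 p.2 [] ++ [p.1] else PySem.List.pyGetD t1 x [] := by
      intro x hx
      exact pyGetD_pySetD_int t1 p.2 x _ [] hp.2.2.1 (by omega) hx
    have hmem : ∀ v u : Int, 0 ≤ v → v ≤ n →
        (u ∈ PySem.List.pyGetD acc' v [] ↔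
          (u ∈ PySem.List.pyGetD acc v [] ∨ ((p.1 = v ∧ p.2 = u) ∨ (p.2 = v ∧ p.1 = u)))) := by
      intro v u hv0 hv1
      rw [hget2 v hv0, hget1 p.2 hp.2.2.1]
      by_cases h2 : v = p.2
      · rw [if_pos h2, h2]
        by_cases h1 : p.2 = p.1
        · rw [if_pos h1, h1]
          simp only [List.mem_append, List.mem_singleton]
          constructor
          · rintro ((hu | hu) | hu) <;> tauto
          · rintro (hu | (⟨_, hu⟩ | ⟨_, hu⟩)) <;> tauto
        · rw [if_neg h1]
          have h1' : p.1 ≠ p.2 := fun h => h1 h.symm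
          simp only [List.mem_append, List.mem_singleton]
          constructor
          · rintro (hu | hu) <;> tauto
          · rintro (hu | (⟨hq, _⟩ | ⟨_, hu⟩))
            · tauto
            · exact absurd hq h1'
            · tauto
      · rw [if_neg h2, hget1 v hv0]
        by_cases h1 : v = p.1
        · rw [if_pos h1, h1]
          have h2' : p.1 ≠ p.2 := fun h => h2 (h1.trans h)
          simp only [List.mem_append, List.mem_singleton]
          constructor
          · rintro (hu | hu) <;> tauto
          · rintro (hu | (⟨_, hu⟩ | ⟨hq, _⟩))
            · tauto
            · tauto
            · exact absurd hq.symm h2'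
        · rw [if_neg h1]
          constructor
          · exact Or.inl
          · rintro (hu | (⟨hq, _⟩ | ⟨hq, _⟩))
            · exact hu
            · exact absurd hq.symm h1
            · exact absurd hq.symm h2
    have hlen' : acc'.length = (n + 1).toNat := by rw [hlenacc', hlen]
    obtain ⟨hL, hM⟩ := ih acc' hlen' (fun q hq => hl q (List.mem_cons.2 (Or.inr hq)))
    rw [List.foldl_cons]
    refine ⟨hL, ?_⟩
    intro v u hv0 hv1
    rw [hM v u hv0 hv1, hmem v u hv0 hv1, adjIn_cons]
    tauto

lemma buildTree_spec (n : Int) (wires : List (Int × Int)) (hn : 1 ≤ n)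
    (hw : ∀ p ∈ wires, 0 ≤ p.1 ∧ p.1 ≤ n ∧ 0 ≤ p.2 ∧ p.2 ≤ n) :
    (buildTree n wires).length = (n + 1).toNat ∧
    ∀ v u : Int, 0 ≤ v → v ≤ n →
      (u ∈ PySem.List.pyGetD (buildTree n wires) v [] ↔ adjIn wires v u) := by
  have hbase : ((PySem.List.pyRange 0 (n + 1) 1).map (fun _ => ([] : List Int))).length
      = (n + 1).toNat := by
    rw [List.length_map, PySem.List.length_pyRange_one]
    omega
  have hbget : ∀ v : Int, 0 ≤ v →
      PySem.List.pyGetD ((PySem.List.pyRange 0 (n + 1) 1).map (fun _ => ([] : List Int))) v []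
        = [] := by
    intro v hv
    by_cases hvl : v < n + 1
    · rw [PySem.List.pyGetD_eq_getElem _ _ hv (by rw [hbase]; omega)]
      simp
    · exact pyGetD_oor _ v [] (by rw [hbase]; omega)
  obtain ⟨hL, hM⟩ := buildTree_go n hn wires _ hbase hw
  refine ⟨hL, ?_⟩
  intro v u hv0 hv1
  unfold buildTree
  rw [hM v u hv0 hv1, hbget v hv0]
  simp

def InvA (n : Int) (wires : List (Int × Int)) (s e : Int) (chk : List Bool)
    (stack : List Int) : Prop :=
  chk.length = (n + 1).toNat ∧
  chkTrue chk 1 ∧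
  stack.Nodup ∧
  (∀ v ∈ stack, 0 ≤ v ∧ v ≤ n ∧ chkTrue chk v) ∧
  (∀ v : Int, 0 ≤ v → v ≤ n → chkTrue chk v → conn wires s e 1 v) ∧
  (∀ v : Int, 0 ≤ v → v ≤ n → chkTrue chk v → v ∉ stack →
    ∀ u, pstep wires s e v u → chkTrue chk u)

lemma fold_dfsStep (n : Int) (wires : List (Int × Int)) (s e now : Int)
    (hn : 1 ≤ n) (hw : ∀ p ∈ wires, 0 ≤ p.1 ∧ p.1 ≤ n ∧ 0 ≤ p.2 ∧ p.2 ≤ n)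
    (_hnow : 0 ≤ now ∧ now ≤ n) :
    ∀ (nbrs : List Int), (∀ u ∈ nbrs, adjIn wires now u) →
    ∀ (chk : List Bool) (stack : List Int) (cnt : Int),
      chk.length = (n + 1).toNat →
      stack.Nodup →
      (∀ v ∈ stack, 0 ≤ v ∧ v ≤ n ∧ chkTrue chk v) →
      cnt = (chk.count true : Int) →
      (let res := nbrs.foldl (dfsStep s e now) (chk, stack, cnt)
       res.1.length = (n + 1).toNat ∧
       (∀ v : Int, 0 ≤ v → chkTrue chk v → chkTrue res.1 v) ∧
       (∀ v : Int, 0 ≤ v → v ≤ n → chkTrue res.1 v →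
          chkTrue chk v ∨ (v ∈ res.2.1 ∧ pstep wires s e now v)) ∧
       res.2.1.Nodup ∧
       (∀ v ∈ res.2.1, 0 ≤ v ∧ v ≤ n ∧ chkTrue res.1 v) ∧
       (∀ v ∈ stack, v ∈ res.2.1) ∧
       res.2.2 = (res.1.count true : Int) ∧
       res.1.count false + res.2.1.length = chk.count false + stack.length ∧
       (∀ u ∈ nbrs, ¬((now = s ∧ u = e) ∨ (now = e ∧ u = s)) → chkTrue res.1 u)) := by
  intro nbrs
  induction nbrs with
  | nil =>
    intro _ chk stack cnt hlen hnd hstack hcnt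
    refine ⟨hlen, fun v _ h => h, fun v _ _ h => Or.inl h, hnd, ?_, fun v hv => hv, hcnt,
      rfl, fun u hu => absurd hu (List.not_mem_nil)⟩
    intro v hv
    exact hstack v hv
  | cons u t ih =>
    intro h_nbrs chk stack cnt hlen hnd hstack hcnt
    have hadj : adjIn wires now u := h_nbrs u List.mem_cons_self
    have hu : 0 ≤ u ∧ u ≤ n := adjIn_rng n wires now u hw hadj
    simp only [List.foldl_cons]
    by_cases hC : (now = s ∧ u = e) ∨ (now = e ∧ u = s) ∨ PySem.List.pyGetD chk u false = true
    · rw [show dfsStep s e now (chk, stack, cnt) u = (chk, stack, cnt) from by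
        simp only [dfsStep]; rw [if_pos hC]]
      obtain ⟨L, M, B, ND, SE, SS, CN, MS, NB⟩ :=
        ih (fun w hw' => h_nbrs w (List.mem_cons.2 (Or.inr hw'))) chk stack cnt hlen hnd hstack hcnt
      refine ⟨L, M, B, ND, SE, SS, CN, MS, ?_⟩
      intro w hwmem hnb
      rcases List.mem_cons.1 hwmem with h | h
      · subst h
        have hct : chkTrue chk w := by
          rcases hC with h' | h' | h'
          · exact absurd (Or.inl h') hnb
          · exact absurd (Or.inr h') hnb
          · exact h'
        exact M w hu.1 hct
      · exact NB w h hnb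
    · push_neg at hC
      obtain ⟨hb1, hb2, hb3⟩ := hC
      have hfalse : PySem.List.pyGetD chk u false = false := by
        cases h : PySem.List.pyGetD chk u false
        · rfl
        · exact absurd h hb3
      have hulen : u < (chk.length : Int) := by rw [hlen]; omega
      rw [show dfsStep s e now (chk, stack, cnt) u
            = (PySem.List.pySetD chk u true, stack ++ [u], cnt + 1) from by
        simp only [dfsStep]
        rw [if_neg (by push_neg; exact ⟨hb1, hb2, by simp [hfalse]⟩)]]
      set chk' := PySem.List.pySetD chk u true with hchk'
      have hlen' : chk'.length = (n + 1).toNat := by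
        rw [hchk', PySem.List.length_pySetD, hlen]
      have getD' : ∀ j : Int, 0 ≤ j →
          PySem.List.pyGetD chk' j false = if j = u then true else PySem.List.pyGetD chk j false :=
        fun j hj => pyGetD_pySetD_int chk u j true false hu.1 hulen hj
      have hmono1 : ∀ v : Int, 0 ≤ v → chkTrue chk v → chkTrue chk' v := by
        intro v hv0 hv
        unfold chkTrue at *
        rw [getD' v hv0]
        by_cases hvu : v = u
        · rw [if_pos hvu]
        · rw [if_neg hvu]; exact hv
      have hchku : chkTrue chk' u := by
        unfold chkTrue; rw [getD' u hu.1, if_pos rfl]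
      have hgetelem : chk[u.toNat]? = some false := by
        have h1 : u.toNat < chk.length := by omega
        rw [List.getElem?_eq_getElem h1]
        rw [PySem.List.pyGetD_eq_getElem chk false hu.1 hulen] at hfalse
        rw [hfalse]
      have hcounts := counts_set_bool chk u.toNat hgetelem
      have hsetform : chk' = chk.set u.toNat true := PySem.List.pySetD_of_nonneg chk true hu.1
      have hnotmem : u ∉ stack := by
        intro h
        have := (hstack u h).2.2
        unfold chkTrue at this
        rw [hfalse] at this
        exact absurd this (by simp)
      have hnd' : (stack ++ [u]).Nodup := by
        rw [List.nodup_append]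
        refine ⟨hnd, List.nodup_singleton u, ?_⟩
        intro a ha b hb
        rw [List.mem_singleton] at hb
        subst hb
        intro h
        subst h
        exact hnotmem ha
      have hstack' : ∀ v ∈ stack ++ [u], 0 ≤ v ∧ v ≤ n ∧ chkTrue chk' v := by
        intro v hv
        rcases List.mem_append.1 hv with h | h
        · obtain ⟨a, b, c⟩ := hstack v h
          exact ⟨a, b, hmono1 v a c⟩
        · rw [List.mem_singleton] at h; subst h
          exact ⟨hu.1, hu.2, hchku⟩
      have hcnt' : cnt + 1 = (chk'.count true : Int) := by
        rw [hsetform, hcounts.1, hcnt]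
        push_cast
        ring
      have hpstep : pstep wires s e now u :=
        (pstep_iff wires s e now u).2 ⟨hadj, by push_neg; exact ⟨hb1, hb2⟩⟩
      obtain ⟨L, M, B, ND, SE, SS, CN, MS, NB⟩ :=
        ih (fun w hw' => h_nbrs w (List.mem_cons.2 (Or.inr hw'))) chk' (stack ++ [u]) (cnt + 1)
          hlen' hnd' hstack' hcnt'
      refine ⟨L, ?_, ?_, ND, SE, ?_, CN, ?_, ?_⟩
      · intro v hv0 hv
        exact M v hv0 (hmono1 v hv0 hv)
      · intro v hv0 hv1 hres
        rcases B v hv0 hv1 hres with h | h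
        · unfold chkTrue at h
          rw [getD' v hv0] at h
          by_cases hvu : v = u
          · subst hvu
            exact Or.inr ⟨SS v (List.mem_append.2 (Or.inr (List.mem_singleton.2 rfl))), hpstep⟩
          · rw [if_neg hvu] at h
            exact Or.inl h
        · exact Or.inr h
      · intro v hv
        exact SS v (List.mem_append.2 (Or.inl hv))
      · rw [MS]
        have h2 := hcounts.2
        rw [← hsetform] at h2
        simp only [List.length_append, List.length_singleton]
        omega
      · intro w hwmem hnb
        rcases List.mem_cons.1 hwmem with h | h
        · subst h
          exact M w hu.1 hchku
        · exact NB w h hnb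

lemma dfsLoop_run (n : Int) (wires : List (Int × Int)) (s e : Int)
    (hn : 1 ≤ n) (hw : ∀ p ∈ wires, 0 ≤ p.1 ∧ p.1 ≤ n ∧ 0 ≤ p.2 ∧ p.2 ≤ n) :
    ∀ (fuel : Nat) (chk : List Bool) (stack : List Int) (cnt : Int),
      InvA n wires s e chk stack →
      cnt = (chk.count true : Int) →
      chk.count false + stack.length ≤ fuel →
      ∃ chk', InvA n wires s e chk' [] ∧
        dfsLoop (buildTree n wires) s e fuel chk stack cnt = (chk'.count true : Int) := by
  intro fuel
  induction fuel with
  | zero =>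
    intro chk stack cnt hinv hcnt hb
    have hstack : stack = [] := by
      have : stack.length = 0 := by omega
      exact List.eq_nil_of_length_eq_zero this
    subst hstack
    exact ⟨chk, hinv, hcnt⟩
  | succ fuel ih =>
    intro chk stack cnt hinv hcnt hb
    rcases List.eq_nil_or_concat stack with hnil | ⟨ys, x, hconc⟩
    · subst hnil
      exact ⟨chk, hinv, hcnt⟩
    · subst hconc
      simp only [List.concat_eq_append] at hinv hb ⊢
      obtain ⟨hlen, h1, hnd, hstk, hR, hC⟩ := hinv
      have hxmem : x ∈ ys ++ [x] := by simp
      obtain ⟨hx0, hx1, hxchk⟩ := hstk x hxmem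
      obtain ⟨hTlen, hTmem⟩ := buildTree_spec n wires hn hw
      have hnbrs : ∀ u ∈ PySem.List.pyGetD (buildTree n wires) x [], adjIn wires x u :=
        fun u hu => (hTmem x u hx0 hx1).1 hu
      have hndys : ys.Nodup := by
        rw [List.nodup_append] at hnd
        exact hnd.1
      have hstkys : ∀ v ∈ ys, 0 ≤ v ∧ v ≤ n ∧ chkTrue chk v :=
        fun v hv => hstk v (List.mem_append.2 (Or.inl hv))
      obtain ⟨L, M, B, ND, SE, SS, CN, MS, NB⟩ :=
        fold_dfsStep n wires s e x hn hw ⟨hx0, hx1⟩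
          (PySem.List.pyGetD (buildTree n wires) x []) hnbrs chk ys cnt hlen hndys hstkys hcnt
      have hunfold : dfsLoop (buildTree n wires) s e (fuel + 1) chk (ys ++ [x]) cnt
          = dfsLoop (buildTree n wires) s e fuel
              ((PySem.List.pyGetD (buildTree n wires) x []).foldl (dfsStep s e x) (chk, ys, cnt)).1
              ((PySem.List.pyGetD (buildTree n wires) x []).foldl (dfsStep s e x) (chk, ys, cnt)).2.1
              ((PySem.List.pyGetD (buildTree n wires) x []).foldl (dfsStep s e x) (chk, ys, cnt)).2.2 := by
        simp only [dfsLoop]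
        rw [PySem.List.pop?_last]
      have hInv' : InvA n wires s e
          ((PySem.List.pyGetD (buildTree n wires) x []).foldl (dfsStep s e x) (chk, ys, cnt)).1
          ((PySem.List.pyGetD (buildTree n wires) x []).foldl (dfsStep s e x) (chk, ys, cnt)).2.1 := by
        refine ⟨L, M 1 (by omega) h1, ND, SE, ?_, ?_⟩
        · intro v hv0 hv1 hv
          rcases B v hv0 hv1 hv with h | ⟨_, hp⟩
          · exact hR v hv0 hv1 h
          · exact (hR x hx0 hx1 hxchk).tail hp
        · intro v hv0 hv1 hv hnotin u hpstep
          rcases B v hv0 hv1 hv with hold | ⟨hin, _⟩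
          · by_cases hvx : v = x
            · subst hvx
              obtain ⟨hadj, hnb⟩ := (pstep_iff wires s e v u).1 hpstep
              exact NB u ((hTmem v u hv0 hv1).2 hadj) hnb
            · have hvny : v ∉ ys := fun hy => hnotin (SS v hy)
              have hvnot : v ∉ ys ++ [x] := by
                rw [List.mem_append, List.mem_singleton]
                rintro (h | h)
                · exact hvny h
                · exact hvx h
              have hu_rng : 0 ≤ u ∧ u ≤ n := by
                obtain ⟨p, hp, _, hm⟩ := hpstep
                have := hw p hp
                omega
              exact M u hu_rng.1 (hC v hv0 hv1 hold hvnot u hpstep)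
          · exact absurd hin hnotin
      have hmeas :
          ((PySem.List.pyGetD (buildTree n wires) x []).foldl (dfsStep s e x) (chk, ys, cnt)).1.count false
            + ((PySem.List.pyGetD (buildTree n wires) x []).foldl (dfsStep s e x) (chk, ys, cnt)).2.1.length
            ≤ fuel := by
        rw [MS]
        simp only [List.length_append, List.length_singleton] at hb
        omega
      obtain ⟨chk', hinv', heq⟩ := ih _ _ _ hInv' CN hmeas
      exact ⟨chk', hinv', by rw [hunfold]; exact heq⟩

-- ===== B-side: label merging computes the connected components =====

def repDict (n : Int) (g : Int → Int) : PySem.Dict Int Int :=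
  PySem.Dict.mk ((PySem.List.pyRange 0 (n + 1) 1).map (fun v => (v, g v)))

lemma getD_mk_map (ks : List Int) (g : Int → Int) (v : Int) (hv : v ∈ ks) :
    (PySem.Dict.mk (ks.map (fun k => (k, g k)))).getD v 0 = g v := by
  induction ks with
  | nil => cases hv
  | cons k t ih =>
    rw [PySem.Dict.getD_eq_get?_getD]
    simp only [List.map_cons, PySem.Dict.get?_mk_cons]
    by_cases hk : k = v
    · simp [hk]
    · have hv' : v ∈ t := by
        rcases List.mem_cons.1 hv with h | h
        · exact absurd h.symm hk
        · exact h
      have := ih hv'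
      rw [PySem.Dict.getD_eq_get?_getD] at this
      simp [hk, this]

lemma getD_repDict (n : Int) (g : Int → Int) (v : Int) (h0 : 0 ≤ v) (h1 : v ≤ n) :
    (repDict n g).getD v 0 = g v := by
  apply getD_mk_map
  rw [PySem.List.mem_pyRange_one]
  omega

lemma values_repDict (n : Int) (g : Int → Int) :
    (repDict n g).values = (PySem.List.pyRange 0 (n + 1) 1).map g := by
  simp [repDict, PySem.Dict.values, List.map_map]

lemma relabel_repDict (n : Int) (g : Int → Int) (ca cb : Int) :
    relabel (repDict n g) ca cb = repDict n (fun v => if g v = ca then cb else g v) := by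
  simp [relabel, repDict, List.map_map]

lemma rtg_add_pair (r : Int → Int → Prop) (hs : Symmetric r) (a b v w : Int) :
    Relation.ReflTransGen (fun x y => r x y ∨ ((a = x ∧ b = y) ∨ (b = x ∧ a = y))) v w ↔
      (Relation.ReflTransGen r v w ∨
       (Relation.ReflTransGen r v a ∧ Relation.ReflTransGen r b w) ∨
       (Relation.ReflTransGen r v b ∧ Relation.ReflTransGen r a w)) := by
  have hsym := Relation.ReflTransGen.symmetric hs
  constructor
  · intro h
    induction h with
    | refl => exact Or.inl Relation.ReflTransGen.refl
    | tail _hxy hstep ih =>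
      rename_i x y
      rcases hstep with hr | ⟨ha, hb'⟩ | ⟨hb', ha⟩
      · rcases ih with h1 | ⟨h1, h2⟩ | ⟨h1, h2⟩
        · exact Or.inl (h1.tail hr)
        · exact Or.inr (Or.inl ⟨h1, h2.tail hr⟩)
        · exact Or.inr (Or.inr ⟨h1, h2.tail hr⟩)
      · subst ha; subst hb'
        rcases ih with h1 | ⟨h1, h2⟩ | ⟨h1, h2⟩
        · exact Or.inr (Or.inl ⟨h1, Relation.ReflTransGen.refl⟩)
        · exact Or.inl (h1.trans (hsym h2))
        · exact Or.inl h1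
      · subst ha; subst hb'
        rcases ih with h1 | ⟨h1, h2⟩ | ⟨h1, h2⟩
        · exact Or.inr (Or.inr ⟨h1, Relation.ReflTransGen.refl⟩)
        · exact Or.inl h1
        · exact Or.inl (h1.trans (hsym h2))
  · have mono : ∀ x y, Relation.ReflTransGen r x y →
        Relation.ReflTransGen (fun x y => r x y ∨ ((a = x ∧ b = y) ∨ (b = x ∧ a = y))) x y := by
      intro x y h
      exact Relation.ReflTransGen.mono (fun x y h => Or.inl h) h
    have pab : Relation.ReflTransGen (fun x y => r x y ∨ ((a = x ∧ b = y) ∨ (b = x ∧ a = y))) a b :=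
      Relation.ReflTransGen.single (Or.inr (Or.inl ⟨rfl, rfl⟩))
    have pba : Relation.ReflTransGen (fun x y => r x y ∨ ((a = x ∧ b = y) ∨ (b = x ∧ a = y))) b a :=
      Relation.ReflTransGen.single (Or.inr (Or.inr ⟨rfl, rfl⟩))
    rintro (h | ⟨h1, h2⟩ | ⟨h1, h2⟩)
    · exact mono _ _ h
    · exact ((mono _ _ h1).trans pab).trans (mono _ _ h2)
    · exact ((mono _ _ h1).trans pba).trans (mono _ _ h2)

lemma conn_nil (s e v w : Int) : conn [] s e v w ↔ v = w := by
  constructor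
  · intro h
    induction h with
    | refl => rfl
    | tail _hxy hstep _ih => rcases hstep with ⟨p, hp, _⟩; cases hp
  · rintro rfl; exact Relation.ReflTransGen.refl

lemma pstep_append (l : List (Int × Int)) (p : Int × Int) (s e x y : Int) :
    pstep (l ++ [p]) s e x y ↔
      pstep l s e x y ∨ (pairEq p.1 p.2 s e = false ∧ ((p.1 = x ∧ p.2 = y) ∨ (p.2 = x ∧ p.1 = y))) := by
  constructor
  · rintro ⟨q, hq, hqe, hm⟩
    rcases List.mem_append.1 hq with h | h
    · exact Or.inl ⟨q, h, hqe, hm⟩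
    · simp at h; subst h; exact Or.inr ⟨hqe, hm⟩
  · rintro (⟨q, hq, hqe, hm⟩ | ⟨hqe, hm⟩)
    · exact ⟨q, List.mem_append.2 (Or.inl hq), hqe, hm⟩
    · exact ⟨p, List.mem_append.2 (Or.inr (by simp)), hqe, hm⟩

def InvB (n : Int) (s e : Int) (l : List (Int × Int)) (g : Int → Int) : Prop :=
  ∀ v w : Int, 0 ≤ v → v ≤ n → 0 ≤ w → w ≤ n → (g v = g w ↔ conn l s e v w)

lemma rtg_congr {r r' : Int → Int → Prop} (h : ∀ x y, r x y ↔ r' x y) (v w : Int) :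
    Relation.ReflTransGen r v w ↔ Relation.ReflTransGen r' v w := by
  constructor
  · intro hh; exact Relation.ReflTransGen.mono (fun x y hx => (h x y).mp hx) hh
  · intro hh; exact Relation.ReflTransGen.mono (fun x y hx => (h x y).mpr hx) hh

lemma conn_append_add (pre : List (Int × Int)) (p : Int × Int) (s e : Int)
    (hpe : pairEq p.1 p.2 s e = false) (v w : Int) :
    conn (pre ++ [p]) s e v w ↔
      (conn pre s e v w ∨
       (conn pre s e v p.1 ∧ conn pre s e p.2 w) ∨
       (conn pre s e v p.2 ∧ conn pre s e p.1 w)) := by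
  unfold conn
  rw [rtg_congr (r' := fun x y => pstep pre s e x y ∨ ((p.1 = x ∧ p.2 = y) ∨ (p.2 = x ∧ p.1 = y)))
      (fun x y => by rw [pstep_append]; simp [hpe]) v w]
  exact rtg_add_pair (pstep pre s e) (pstep_symm pre s e) p.1 p.2 v w

lemma conn_append_skip (pre : List (Int × Int)) (p : Int × Int) (s e : Int)
    (hpe : pairEq p.1 p.2 s e = true) (v w : Int) :
    conn (pre ++ [p]) s e v w ↔ conn pre s e v w := by
  unfold conn
  exact rtg_congr (fun x y => by rw [pstep_append]; simp [hpe]) v w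

lemma conn_symm_iff (l : List (Int × Int)) (s e v w : Int) :
    conn l s e v w ↔ conn l s e w v :=
  ⟨fun h => conn_symm l s e h, fun h => conn_symm l s e h⟩

lemma mergeStep_inv (n : Int) (s e : Int) (pre : List (Int × Int)) (g : Int → Int)
    (p : Int × Int) (hp : 0 ≤ p.1 ∧ p.1 ≤ n ∧ 0 ≤ p.2 ∧ p.2 ≤ n)
    (hg : InvB n s e pre g) :
    ∃ g', mergeStep s e (repDict n g) p = repDict n g' ∧ InvB n s e (pre ++ [p]) g' := by
  by_cases hpe : pairEq p.1 p.2 s e = true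
  · refine ⟨g, by simp [mergeStep, hpe], ?_⟩
    intro v w hv0 hv1 hw0 hw1
    rw [conn_append_skip pre p s e hpe]
    exact hg v w hv0 hv1 hw0 hw1
  · have hpe' : pairEq p.1 p.2 s e = false := by simpa using hpe
    have hca : (repDict n g).getD p.1 0 = g p.1 := getD_repDict n g p.1 hp.1 hp.2.1
    have hcb : (repDict n g).getD p.2 0 = g p.2 := getD_repDict n g p.2 hp.2.2.1 hp.2.2.2
    have atomA : ∀ v, 0 ≤ v → v ≤ n → (conn pre s e v p.1 ↔ g v = g p.1) := by
      intro v hv0 hv1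
      rw [← hg v p.1 hv0 hv1 hp.1 hp.2.1]
    have atomB : ∀ v, 0 ≤ v → v ≤ n → (conn pre s e v p.2 ↔ g v = g p.2) := by
      intro v hv0 hv1
      rw [← hg v p.2 hv0 hv1 hp.2.2.1 hp.2.2.2]
    by_cases hne : g p.1 = g p.2
    · refine ⟨g, ?_, ?_⟩
      · simp [mergeStep, hpe', hca, hcb, hne]
      · intro v w hv0 hv1 hw0 hw1
        rw [conn_append_add pre p s e hpe' v w,
            ← hg v w hv0 hv1 hw0 hw1,
            atomA v hv0 hv1,
            conn_symm_iff pre s e p.2 w, atomB w hw0 hw1,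
            atomB v hv0 hv1,
            conn_symm_iff pre s e p.1 w, atomA w hw0 hw1]
        omega
    · refine ⟨fun v => if g v = g p.1 then g p.2 else g v, ?_, ?_⟩
      · simp only [mergeStep, hpe', Bool.false_eq_true, if_false, hca, hcb]
        rw [if_pos (by simpa using hne)]
        exact relabel_repDict n g (g p.1) (g p.2)
      · intro v w hv0 hv1 hw0 hw1
        rw [conn_append_add pre p s e hpe' v w,
            ← hg v w hv0 hv1 hw0 hw1,
            atomA v hv0 hv1,
            conn_symm_iff pre s e p.2 w, atomB w hw0 hw1,
            atomB v hv0 hv1,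
            conn_symm_iff pre s e p.1 w, atomA w hw0 hw1]
        dsimp only
        split_ifs <;> omega

lemma fold_mergeStep (n : Int) (s e : Int) :
    ∀ (l pre : List (Int × Int)) (g : Int → Int),
      (∀ p ∈ l, 0 ≤ p.1 ∧ p.1 ≤ n ∧ 0 ≤ p.2 ∧ p.2 ≤ n) →
      InvB n s e pre g →
      ∃ g', List.foldl (mergeStep s e) (repDict n g) l = repDict n g' ∧
        InvB n s e (pre ++ l) g' := by
  intro l
  induction l with
  | nil => intro pre g _ hg; exact ⟨g, by simp, by simpa using hg⟩
  | cons p t ih =>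
    intro pre g hl hg
    obtain ⟨g1, hstep, hinv1⟩ := mergeStep_inv n s e pre g p (hl p (by simp)) hg
    obtain ⟨g', hfold, hinv'⟩ := ih (pre ++ [p]) g1 (fun q hq => hl q (by simp [hq])) hinv1
    refine ⟨g', ?_, ?_⟩
    · rw [List.foldl_cons, hstep, hfold]
    · simpa [List.append_assoc] using hinv'

-- ===== joining the two sides =====

lemma closed_reach (n : Int) (wires : List (Int × Int)) (s e : Int)
    (hn : 1 ≤ n) (hw : ∀ p ∈ wires, 0 ≤ p.1 ∧ p.1 ≤ n ∧ 0 ≤ p.2 ∧ p.2 ≤ n)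
    (chk' : List Bool) (hinv : InvA n wires s e chk' []) :
    ∀ v : Int, conn wires s e 1 v → chkTrue chk' v := by
  obtain ⟨_, h1, _, _, _, hC⟩ := hinv
  intro v h
  induction h with
  | refl => exact h1
  | tail hxy hstep ihh =>
    rename_i x y
    have hx := conn_rng n wires s e x hn hw hxy
    exact hC x hx.1 hx.2 ihh (List.not_mem_nil) y hstep

lemma perWire (n : Int) (wires : List (Int × Int)) (s e : Int)
    (hn : 1 ≤ n) (hw : ∀ p ∈ wires, 0 ≤ p.1 ∧ p.1 ≤ n ∧ 0 ≤ p.2 ∧ p.2 ≤ n) :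
    dfsLoop (buildTree n wires) s e (n.toNat + 2)
        (PySem.List.pySetD ((PySem.List.pyRange 0 (n + 1) 1).map (fun _ => false)) 1 true) [1] 1
      = ((List.foldl (mergeStep s e)
            (PySem.Dict.mk ((PySem.List.pyRange 0 (n + 1) 1).map (fun v => (v, v))))
            wires).values.count
          ((List.foldl (mergeStep s e)
            (PySem.Dict.mk ((PySem.List.pyRange 0 (n + 1) 1).map (fun v => (v, v))))
            wires).getD 1 0) : Int) := by
  -- base all-false list and the start state
  set base : List Bool := (PySem.List.pyRange 0 (n + 1) 1).map (fun _ => false) with hbase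
  have hblen : base.length = (n + 1).toNat := by
    rw [hbase, List.length_map, PySem.List.length_pyRange_one]
    omega
  have hbget : ∀ v : Int, 0 ≤ v → PySem.List.pyGetD base v false = false := by
    intro v hv
    by_cases hvl : v < n + 1
    · rw [PySem.List.pyGetD_eq_getElem _ _ hv (by rw [hblen]; omega)]
      simp [hbase]
    · exact pyGetD_oor _ v false (by rw [hblen]; omega)
  set chk0 : List Bool := PySem.List.pySetD base 1 true with hchk0
  have hlen0 : chk0.length = (n + 1).toNat := by
    rw [hchk0, PySem.List.length_pySetD, hblen]
  have getD0 : ∀ j : Int, 0 ≤ j →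
      PySem.List.pyGetD chk0 j false = if j = 1 then true else PySem.List.pyGetD base j false :=
    fun j hj => pyGetD_pySetD_int base 1 j true false (by omega) (by rw [hblen]; omega) hj
  have chk1 : chkTrue chk0 1 := by
    unfold chkTrue
    rw [getD0 1 (by omega), if_pos rfl]
  have hRv : ∀ v : Int, 0 ≤ v → chkTrue chk0 v → v = 1 := by
    intro v hv0 hv
    unfold chkTrue at hv
    rw [getD0 v hv0] at hv
    by_cases h : v = 1
    · exact h
    · rw [if_neg h, hbget v hv0] at hv
      exact absurd hv (by simp)
  have hsetform0 : chk0 = base.set (1 : Int).toNat true :=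
    PySem.List.pySetD_of_nonneg base true (by omega)
  have hbelem : base[(1 : Int).toNat]? = some false := by
    have h1l : (1 : Int).toNat < base.length := by rw [hblen]; omega
    rw [List.getElem?_eq_getElem h1l]
    have := hbget 1 (by omega)
    rw [PySem.List.pyGetD_eq_getElem base false (by omega) (by rw [hblen]; omega)] at this
    rw [this]
  have hcounts0 := counts_set_bool base (1 : Int).toNat hbelem
  have hbct : base.count true = 0 := by
    rw [List.count_eq_zero]
    intro h
    rw [hbase] at h
    rcases List.mem_map.1 h with ⟨_, _, hfalse⟩
    exact absurd hfalse (by simp)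
  have hcnt0 : (1 : Int) = (chk0.count true : Int) := by
    rw [hsetform0, hcounts0.1, hbct]
    simp
  have hinv0 : InvA n wires s e chk0 [1] := by
    refine ⟨hlen0, chk1, by simp, ?_, ?_, ?_⟩
    · intro v hv
      rw [List.mem_singleton] at hv
      subst hv
      exact ⟨by omega, hn, chk1⟩
    · intro v hv0 _ hv
      rw [hRv v hv0 hv]
      exact Relation.ReflTransGen.refl
    · intro v hv0 _ hv hnot
      exact absurd (List.mem_singleton.2 (hRv v hv0 hv)) hnot
  have hmeas0 : chk0.count false + ([1] : List Int).length ≤ n.toNat + 2 := by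
    have := @List.count_le_length Bool _ false chk0
    rw [hlen0] at this
    simp only [List.length_singleton]
    omega
  obtain ⟨chk', hinv', heq⟩ :=
    dfsLoop_run n wires s e hn hw (n.toNat + 2) chk0 [1] 1 hinv0 hcnt0 hmeas0
  -- B side
  have hinvB0 : InvB n s e [] (fun v => v) := by
    intro v w _ _ _ _
    rw [conn_nil]
  obtain ⟨g', hfold, hinvB⟩ := fold_mergeStep n s e wires [] (fun v => v) hw hinvB0
  rw [List.nil_append] at hinvB
  have hcomp : (PySem.Dict.mk ((PySem.List.pyRange 0 (n + 1) 1).map (fun v => (v, v)))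
      : PySem.Dict Int Int) = repDict n (fun v => v) := rfl
  rw [hcomp, hfold, getD_repDict n g' 1 (by omega) hn, values_repDict]
  -- counts as countP over the range
  have hclen : ((chk'.length : Int)) = n + 1 := by
    rw [hinv'.1]; omega
  have hchk'eq : chk' = (PySem.List.pyRange 0 (n + 1) 1).map
      (fun j => PySem.List.pyGetD chk' j false) := by
    conv_lhs => rw [← PySem.List.map_pyGetD_pyRange_zero' chk' false]
    rw [hclen]
  have hA : chk'.count true
      = (PySem.List.pyRange 0 (n + 1) 1).countP (fun v => PySem.List.pyGetD chk' v false) := by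
    conv_lhs => rw [hchk'eq]
    rw [List.count_eq_countP, List.countP_map]
    apply List.countP_congr
    intro v _
    simp
  have hB : ((PySem.List.pyRange 0 (n + 1) 1).map g').count (g' 1)
      = (PySem.List.pyRange 0 (n + 1) 1).countP (fun v => g' v == g' 1) := by
    rw [List.count_eq_countP, List.countP_map]
    rfl
  rw [heq, hA, hB]
  congr 1
  apply List.countP_congr
  intro v hv
  rw [PySem.List.mem_pyRange_one] at hv
  have hv0 : 0 ≤ v := hv.1
  have hv1 : v ≤ n := by omega
  have hAiff : PySem.List.pyGetD chk' v false = true ↔ conn wires s e 1 v := by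
    constructor
    · intro h
      exact hinv'.2.2.2.2.1 v hv0 hv1 h
    · intro h
      exact closed_reach n wires s e hn hw chk' hinv' v h
  have hBiff : g' v = g' 1 ↔ conn wires s e 1 v := by
    rw [hinvB v 1 hv0 hv1 (by omega) hn, conn_symm_iff]
  rw [hAiff, beq_iff_eq, hBiff]

-- ===== VERDICT (by name: the statement is the Claim_ definition above) =====
theorem solution_spec : Claim_equal_solution := by
  intro n wires _hdom hpre
  unfold Spec_solution
  rcases hpre with h | ⟨hn, hw⟩
  · subst h; rfl
  · show solution n wires = solution_alt n wires
    unfold solution solution_alt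
    refine PySem.List.foldl_congr_mem wires _ _ _ ?_
    intro acc se hse
    have h := perWire n wires se.1 se.2 hn hw
    simp only at h ⊢
    rw [h]
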